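-- pv_equiv track=rewrite | github.com/Ch3m1stryK1ng/sourceagent | sourceagent/pipeline/microbench_gt_v2_eval.py | _strongest_check_strength
-- ===== SOURCE A (Python) =====
-- from typing import Any, Dict, Iterable, List, Optional, Sequence, Tuple
--
-- def _strongest_check_strength(checks: Sequence[Dict[str, Any]]) -> str:
--     rank = {"unknown": 0, "weak": 1, "absent": 2, "effective": 3}
--     strongest = "unknown"
--     best = -1
--     for row in checks:
--         cur = str(row.get("strength", "unknown") or "unknown").lower()
--         if rank.get(cur, -1) > best:
--             strongest = cur
--             best = rank.get(cur, -1)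
--     return strongest
-- ===== SOURCE B (Python) =====
-- def _strongest_check_strength(checks):
--     present = {str(row.get("strength", "unknown") or "unknown").lower() for row in checks}
--     for label in ("effective", "absent", "weak", "unknown"):
--         if label in present:
--             return label
--     return "unknown"
-- ===== Notes on version B (the rewrite author's own statement) =====
-- stated objective: idiomatic
-- what changed: Replaces the running-max scan carrying (strongest,best) state with a one-pass set build of normalized strengths followed by a probe over the fixed rank table in descending order.
import Mathlib
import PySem

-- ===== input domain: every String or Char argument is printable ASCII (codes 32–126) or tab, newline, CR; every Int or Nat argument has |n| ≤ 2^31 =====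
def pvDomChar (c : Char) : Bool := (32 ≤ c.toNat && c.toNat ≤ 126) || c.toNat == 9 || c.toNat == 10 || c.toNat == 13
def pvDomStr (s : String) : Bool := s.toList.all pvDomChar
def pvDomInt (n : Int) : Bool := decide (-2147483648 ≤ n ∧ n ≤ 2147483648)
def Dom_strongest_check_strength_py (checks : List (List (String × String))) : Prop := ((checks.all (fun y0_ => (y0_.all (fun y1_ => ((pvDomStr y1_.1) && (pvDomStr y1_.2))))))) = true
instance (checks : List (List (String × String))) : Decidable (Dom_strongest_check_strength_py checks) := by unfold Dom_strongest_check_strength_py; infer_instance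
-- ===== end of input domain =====

-- B builds the set of normalized strength labels once, then probes the fixed
-- rank table in descending order, instead of A's running-max scan (objective: idiomatic).

-- shared normalization helper: str(row.get("strength", "unknown") or "unknown").lower()
def pvNorm (row : List (String × String)) : String :=
  let v := PySem.Dict.getD (PySem.Dict.mk row) "strength" "unknown"
  PySem.Str.lower (if v = "" then "unknown" else v)

-- ===== PORT A =====
def strongest_check_strength_py (checks : List (List (String × String))) : String :=
  let rank : PySem.Dict String Int :=
    PySem.Dict.ofList [("unknown", 0), ("weak", 1), ("absent", 2), ("effective", 3)]
  let st := checks.foldl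
    (fun (sb : String × Int) row =>
      let cur := pvNorm row
      if PySem.Dict.getD rank cur (-1) > sb.2 then (cur, PySem.Dict.getD rank cur (-1)) else sb)
    ("unknown", -1)
  st.1

-- ===== PORT B =====
-- the probe loop: first label of the rank table present in the set, else "unknown"
def pvProbe : List String → PySem.Set String → String
  | [], _ => "unknown"
  | l :: ls, s => if l ∈ s then l else pvProbe ls s

def strongest_check_strength_py_alt (checks : List (List (String × String))) : String :=
  let present : PySem.Set String := PySem.Set.ofList (checks.map pvNorm)
  pvProbe ["effective", "absent", "weak", "unknown"] present

-- ===== PRECONDITION & SPEC =====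
def Spec_strongest_check_strength_py (checks : List (List (String × String))) (out : String) : Prop := out = strongest_check_strength_py_alt checks
instance (checks : List (List (String × String))) (out : String) : Decidable (Spec_strongest_check_strength_py checks out) := by unfold Spec_strongest_check_strength_py; infer_instance

-- ===== CLAIM (what is proved, stated in full; the proofs are below) =====
def Claim_equal_strongest_check_strength_py : Prop := ∀ (checks : List (List (String × String))), Dom_strongest_check_strength_py checks → Spec_strongest_check_strength_py checks (strongest_check_strength_py checks)

-- ===== LEMMAS AND PROOFS =====

def pvRankOf (s : String) : Int :=
  if s = "effective" then 3 else if s = "absent" then 2 else if s = "weak" then 1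
  else if s = "unknown" then 0 else -1

def pvLabelOf (r : Int) : String :=
  if r = 3 then "effective" else if r = 2 then "absent" else if r = 1 then "weak" else "unknown"

def pvMaxRank : List String → Int
  | [] => -1
  | x :: t => max (pvRankOf x) (pvMaxRank t)

lemma pvRankOf_bounds (s : String) : -1 ≤ pvRankOf s ∧ pvRankOf s ≤ 3 := by
  unfold pvRankOf; split_ifs <;> omega

lemma pvMaxRank_cons (x : String) (t : List String) :
    pvMaxRank (x :: t) = max (pvRankOf x) (pvMaxRank t) := rfl

lemma pvMaxRank_bounds (l : List String) : -1 ≤ pvMaxRank l ∧ pvMaxRank l ≤ 3 := by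
  induction l with
  | nil => simp [pvMaxRank]
  | cons x t ih =>
    have := pvRankOf_bounds x
    rw [pvMaxRank_cons]
    omega

lemma pvMaxRank_mem_le {a : String} {l : List String} (h : a ∈ l) : pvRankOf a ≤ pvMaxRank l := by
  induction l with
  | nil => simp at h
  | cons x t ih =>
    rw [pvMaxRank_cons]
    rcases List.mem_cons.mp h with h | h
    · subst h; omega
    · have := ih h; omega

lemma pvMaxRank_attained (l : List String) :
    pvMaxRank l = -1 ∨ ∃ a ∈ l, pvRankOf a = pvMaxRank l := by
  induction l with
  | nil => left; rfl
  | cons x t ih =>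
    by_cases hx : pvMaxRank t ≤ pvRankOf x
    · right; exact ⟨x, List.mem_cons_self, by rw [pvMaxRank_cons]; omega⟩
    · rcases ih with h | ⟨a, ha, hr⟩
      · rw [pvMaxRank_cons]; omega
      · right; exact ⟨a, List.mem_cons_of_mem _ ha, by rw [pvMaxRank_cons]; omega⟩

lemma pvRankOf_label {a : String} {r : Int} (h : pvRankOf a = r) (hr : 0 ≤ r) :
    a = pvLabelOf r := by
  unfold pvRankOf at h
  split_ifs at h with h3 h2 h1 h0
  · rw [h3, ← h]; decide
  · rw [h2, ← h]; decide
  · rw [h1, ← h]; decide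
  · rw [h0, ← h]; decide
  · omega

-- A's rank dict lookup is pvRankOf
lemma pvGetD_rank (s : String) :
    PySem.Dict.getD (PySem.Dict.ofList [("unknown", (0:Int)), ("weak", 1), ("absent", 2), ("effective", 3)]) s (-1) = pvRankOf s := by
  have hd : PySem.Dict.ofList [("unknown", (0:Int)), ("weak", 1), ("absent", 2), ("effective", 3)]
      = PySem.Dict.mk [("unknown", 0), ("weak", 1), ("absent", 2), ("effective", 3)] := by decide
  rw [hd, PySem.Dict.getD_eq_get?_getD]
  simp only [PySem.Dict.get?_mk_cons]
  by_cases h0 : s = "unknown"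
  · subst h0; decide
  by_cases h1 : s = "weak"
  · subst h1; decide
  by_cases h2 : s = "absent"
  · subst h2; decide
  by_cases h3 : s = "effective"
  · subst h3; decide
  simp [pvRankOf, PySem.Dict.get?, h0, h1, h2, h3, Ne.symm h0, Ne.symm h1, Ne.symm h2, Ne.symm h3]

-- characterization of A's fold
lemma pvFoldA (l : List String) (s : String) (b : Int) (hb : -1 ≤ b) :
    l.foldl (fun (sb : String × Int) x =>
        if pvRankOf x > sb.2 then (x, pvRankOf x) else sb) (s, b)
      = if pvMaxRank l > b then (pvLabelOf (pvMaxRank l), pvMaxRank l) else (s, b) := by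
  induction l generalizing s b with
  | nil =>
    simp only [List.foldl_nil, pvMaxRank]
    rw [if_neg (by omega)]
  | cons x t ih =>
    simp only [List.foldl_cons]
    rw [pvMaxRank_cons]
    by_cases hx : pvRankOf x > b
    · rw [if_pos hx]
      have hx0 : 0 ≤ pvRankOf x := by omega
      rw [ih x (pvRankOf x) (by omega)]
      by_cases ht : pvMaxRank t > pvRankOf x
      · rw [if_pos ht, if_pos (by omega)]
        have : max (pvRankOf x) (pvMaxRank t) = pvMaxRank t := by omega
        rw [this]
      · rw [if_neg ht, if_pos (by omega)]
        have hm : max (pvRankOf x) (pvMaxRank t) = pvRankOf x := by omega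
        rw [hm, ← pvRankOf_label rfl hx0]
    · rw [if_neg hx]
      rw [ih s b hb]
      by_cases ht : pvMaxRank t > b
      · rw [if_pos ht, if_pos (by omega)]
        have : max (pvRankOf x) (pvMaxRank t) = pvMaxRank t := by omega
        rw [this]
      · rw [if_neg ht, if_neg (by omega)]

lemma pvA_eq (checks : List (List (String × String))) :
    strongest_check_strength_py checks = pvLabelOf (pvMaxRank (checks.map pvNorm)) := by
  unfold strongest_check_strength_py
  simp only []
  have hstep : (checks.foldl
      (fun (sb : String × Int) row =>
        if PySem.Dict.getD (PySem.Dict.ofList [("unknown", (0:Int)), ("weak", 1), ("absent", 2), ("effective", 3)]) (pvNorm row) (-1) > sb.2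
        then (pvNorm row, PySem.Dict.getD (PySem.Dict.ofList [("unknown", (0:Int)), ("weak", 1), ("absent", 2), ("effective", 3)]) (pvNorm row) (-1)) else sb)
      ("unknown", -1))
      = ((checks.map pvNorm).foldl (fun (sb : String × Int) x =>
        if pvRankOf x > sb.2 then (x, pvRankOf x) else sb) ("unknown", -1)) := by
    rw [List.foldl_map]
    simp only [pvGetD_rank]
  rw [hstep, pvFoldA _ _ _ (by omega)]
  by_cases h : pvMaxRank (checks.map pvNorm) > -1
  · rw [if_pos h]
  · rw [if_neg h]
    have hb := pvMaxRank_bounds (checks.map pvNorm)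
    have : pvMaxRank (checks.map pvNorm) = -1 := by omega
    rw [this]; rfl

lemma pvNotMem_maxRank {l : List String} {lbl : String} {r : Int} (hr0 : 0 ≤ r)
    (hlbl : pvLabelOf r = lbl) (h : lbl ∉ l) : pvMaxRank l ≠ r := by
  intro h'
  rcases pvMaxRank_attained l with he | ⟨a, ha, hra⟩
  · omega
  · rw [h'] at hra
    have hal := pvRankOf_label hra hr0
    rw [hlbl] at hal
    exact h (hal ▸ ha)

lemma pvB_eq (checks : List (List (String × String))) :
    strongest_check_strength_py_alt checks = pvLabelOf (pvMaxRank (checks.map pvNorm)) := by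
  unfold strongest_check_strength_py_alt
  simp only [pvProbe, PySem.Set.mem_ofList]
  set l := checks.map pvNorm with hl
  have hb := pvMaxRank_bounds l
  by_cases h3 : "effective" ∈ l
  · have := pvMaxRank_mem_le h3
    have h : pvMaxRank l = 3 := by simp [pvRankOf] at this; omega
    simp [h3, h, pvLabelOf]
  · have hne3 : pvMaxRank l ≠ 3 := by
      exact pvNotMem_maxRank (by omega) (by decide) h3
    by_cases h2 : "absent" ∈ l
    · have := pvMaxRank_mem_le h2
      have h : pvMaxRank l = 2 := by simp [pvRankOf] at this; omega
      simp [h3, h2, h, pvLabelOf]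
    · have hne2 : pvMaxRank l ≠ 2 := by
        exact pvNotMem_maxRank (by omega) (by decide) h2
      by_cases h1 : "weak" ∈ l
      · have := pvMaxRank_mem_le h1
        have h : pvMaxRank l = 1 := by simp [pvRankOf] at this; omega
        simp [h3, h2, h1, h, pvLabelOf]
      · have hne1 : pvMaxRank l ≠ 1 := by
          exact pvNotMem_maxRank (by omega) (by decide) h1
        by_cases h0 : "unknown" ∈ l
        · have := pvMaxRank_mem_le h0
          have h : pvMaxRank l = 0 := by simp [pvRankOf] at this; omega
          simp [h3, h2, h1, h0, h, pvLabelOf]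
        · have hne0 : pvMaxRank l ≠ 0 := by
            exact pvNotMem_maxRank (by omega) (by decide) h0
          have h : pvMaxRank l = -1 := by omega
          simp [h3, h2, h1, h0, h, pvLabelOf]

-- ===== VERDICT (by name: the statement is the Claim_ definition above) =====
theorem strongest_check_strength_py_spec : Claim_equal_strongest_check_strength_py := by
  intro checks _
  unfold Spec_strongest_check_strength_py
  rw [pvA_eq, pvB_eq]
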